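-- pv_equiv track=rewrite | github.com/sudo-boo/cs378-lab5 | Lab02/xtras/decoder.py | brute_force_correct
-- ===== SOURCE A (Python) =====
-- def xor(a, b):
--     """Performs XOR operation between two binary strings."""
--     result = []
--     for i in range(1, len(b)):
--         if a[i] == b[i]:
--             result.append('0')
--         else:
--             result.append('1')
--     return ''.join(result)
--
-- def mod2div(dividend, divisor):
--     """Performs modulo-2 division (bitwise XOR division)."""
--     pick = len(divisor)
--     tmp = dividend[0:pick]
--
--     while pick < len(dividend):
--         if tmp[0] == '1':
--             tmp = xor(divisor, tmp) + dividend[pick]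
--         else:
--             tmp = xor('0'*pick, tmp) + dividend[pick]
--         pick += 1
--
--     if tmp[0] == '1':
--         tmp = xor(divisor, tmp)
--     else:
--         tmp = xor('0'*pick, tmp)
--
--     return tmp
--
-- def check_data(received_data, key):
--     """Checks received data for errors using the CRC key."""
--     remainder = mod2div(received_data, key)
--     return remainder == '0' * (len(key) - 1)
--
-- def brute_force_correct(data, key):
--     """Performs brute-force correction by trying all 1-bit and 2-bit flips with optimizations."""
--     n = len(data)
--
--     # Check all 1-bit flips
--     for i in range(n):
--         flipped_data = data[:i] + ('1' if data[i] == '0' else '0') + data[i+1:]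
--         if check_data(flipped_data, key):
--             return flipped_data, [i]
--
--     # Check all 2-bit flips
--     for i in range(n):
--         for j in range(i + 1, n):
--             flipped_data = data[:i] + ('1' if data[i] == '0' else '0') + data[i + 1:j] + ('1' if data[j] == '0' else '0') + data[j + 1:]
--             if check_data(flipped_data, key):
--                 return flipped_data, [i, j]
--
--     return None, []
-- ===== SOURCE B (Python) =====
-- def _rem(bits, kb):
--     """CRC remainder (last k-1 bits of mod-2 division) of a bit list, k = len(kb)."""
--     k = len(kb)
--     window = list(bits[:k])
--     for b in bits[k:]:
--         if window[0]:
--             window = [window[t] ^ kb[t] for t in range(1, k)]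
--         else:
--             window = window[1:]
--         window.append(b)
--     if window[0]:
--         return [window[t] ^ kb[t] for t in range(1, k)]
--     return window[1:]
--
--
-- def _apply(data, idxs):
--     chars = list(data)
--     for i in idxs:
--         chars[i] = '1' if chars[i] == '0' else '0'
--     return ''.join(chars)
--
--
-- def brute_force_correct(data, key):
--     """Syndrome-based correction: by linearity of CRC division over GF(2),
--     the remainder of data with bits flipped at positions P equals the
--     remainder of data XOR-ed with the remainders of the unit vectors e_i,
--     i in P.  So precompute all single-bit syndromes once and compare
--     syndromes instead of re-running the division for every candidate."""
--     n, k = len(data), len(key)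
--     if n == 0:
--         return None, []
--     if n < k:
--         # the remainder is shorter than the k-1 zero string: no candidate can pass
--         return None, []
--     kb = [c == '1' for c in key]
--     bits = [c == '1' for c in data]
--     S = _rem(bits, kb)
--     syn = [_rem([t == i for t in range(n)], kb) for i in range(n)]
--     for i in range(n):
--         if S == syn[i]:
--             return _apply(data, [i]), [i]
--     for i in range(n):
--         target = [a ^ b for a, b in zip(S, syn[i])]
--         for j in range(i + 1, n):
--             if syn[j] == target:
--                 return _apply(data, [i, j]), [i, j]
--     return None, []
-- ===== Notes on version B (the rewrite author's own statement) =====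
-- stated objective: faster
-- what changed: B exploits GF(2)-linearity of CRC division: it computes the data's remainder and all n single-bit syndromes once, then tests each 1-bit candidate by syndrome equality and each 2-bit candidate by an O(k) syndrome comparison, never re-building a flipped string or re-running the division per candidate.
-- outside the precondition, e.g. on brute_force_correct('ab', '11'): A returns ('a0', [1]), B returns ('00', [0, 1]); on brute_force_correct('0', ''): A raises IndexError, B raises IndexError
import Mathlib
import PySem

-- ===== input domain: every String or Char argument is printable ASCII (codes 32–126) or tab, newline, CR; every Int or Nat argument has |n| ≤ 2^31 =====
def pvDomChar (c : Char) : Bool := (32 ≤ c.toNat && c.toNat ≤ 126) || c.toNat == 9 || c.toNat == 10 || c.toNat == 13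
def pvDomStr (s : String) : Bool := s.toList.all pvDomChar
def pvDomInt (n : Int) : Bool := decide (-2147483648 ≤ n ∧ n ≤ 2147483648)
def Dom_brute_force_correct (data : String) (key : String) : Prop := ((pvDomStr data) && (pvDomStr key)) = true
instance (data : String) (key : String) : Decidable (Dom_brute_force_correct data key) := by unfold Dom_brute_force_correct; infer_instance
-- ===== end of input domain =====

-- B replaces A's per-candidate CRC division of rebuilt flipped strings by precomputed
-- single-bit syndromes compared via GF(2)-linearity of the CRC remainder; objective: faster.

-- ===== PORT A =====
-- xor(a, b): result list of '0'/'1' for i in range(1, len(b))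
def xorA (a b : List Char) : List Char :=
  (PySem.List.pyRange 1 (PySem.List.len b)).foldl
    (fun result i =>
      result ++ [if PySem.List.pyGetD a i ' ' == PySem.List.pyGetD b i ' ' then '0' else '1'])
    []

-- the 'while pick < len(dividend)' loop of mod2div, then the final xor step
def mod2divGo (dividend divisor : List Char) (pick : Nat) (tmp : List Char) : List Char :=
  if h : pick < dividend.length then
    let tmp' :=
      if PySem.List.pyGetD tmp 0 ' ' == '1' then
        xorA divisor tmp ++ [PySem.List.pyGetD dividend (pick : Int) ' ']
      else
        xorA (List.replicate pick '0') tmp ++ [PySem.List.pyGetD dividend (pick : Int) ' ']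
    mod2divGo dividend divisor (pick + 1) tmp'
  else
    if PySem.List.pyGetD tmp 0 ' ' == '1' then xorA divisor tmp
    else xorA (List.replicate pick '0') tmp
termination_by dividend.length - pick

def mod2divA (dividend divisor : List Char) : List Char :=
  mod2divGo dividend divisor divisor.length
    (PySem.List.slice dividend (some 0) (some (PySem.List.len divisor)))

-- check_data: remainder == '0' * (len(key) - 1)
def checkDataA (received key : List Char) : Bool :=
  mod2divA received key == List.replicate (key.length - 1) '0'

-- data[:i] + flip + data[i+1:]
def flipAt1 (data : List Char) (i : Nat) : List Char :=
  PySem.List.slice data none (some (i : Int)) ++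
    [if PySem.List.pyGetD data (i : Int) ' ' == '0' then '1' else '0'] ++
    PySem.List.slice data (some ((i : Int) + 1)) none

-- data[:i] + flip + data[i+1:j] + flip + data[j+1:]
def flipAt2 (data : List Char) (i j : Nat) : List Char :=
  PySem.List.slice data none (some (i : Int)) ++
    [if PySem.List.pyGetD data (i : Int) ' ' == '0' then '1' else '0'] ++
    PySem.List.slice data (some ((i : Int) + 1)) (some (j : Int)) ++
    [if PySem.List.pyGetD data (j : Int) ' ' == '0' then '1' else '0'] ++
    PySem.List.slice data (some ((j : Int) + 1)) none

-- 'for i in range(n): … return' as an Option-returning recursion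
def search1A (data key : List Char) (i : Nat) : Option (List Char × List Int) :=
  if h : i < data.length then
    let fl := flipAt1 data i
    if checkDataA fl key then some (fl, [(i : Int)]) else search1A data key (i + 1)
  else none
termination_by data.length - i

def search2InnerA (data key : List Char) (i j : Nat) : Option (List Char × List Int) :=
  if h : j < data.length then
    let fl := flipAt2 data i j
    if checkDataA fl key then some (fl, [(i : Int), (j : Int)])
    else search2InnerA data key i (j + 1)
  else none
termination_by data.length - j

def search2A (data key : List Char) (i : Nat) : Option (List Char × List Int) :=
  if _h : i < data.length then
    match search2InnerA data key i (i + 1) with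
    | some r => some r
    | none => search2A data key (i + 1)
  else none
termination_by data.length - i

def brute_force_correct (data : String) (key : String) : Option String × List Int :=
  match search1A data.toList key.toList 0 with
  | some (fl, idx) => (some (String.mk fl), idx)
  | none =>
    match search2A data.toList key.toList 0 with
    | some (fl, idx) => (some (String.mk fl), idx)
    | none => (none, [])

-- ===== PORT B =====
-- _rem(bits, kb) of Source B: the CRC remainder of a bit list (window loop, then final reduction)
def remB (bits kb : List Bool) : List Bool :=
  let k := kb.length
  let window := (bits.drop k).foldl
    (fun w b =>
      (if w.getD 0 false then
        (List.range' 1 (k - 1)).map (fun t => xor (w.getD t false) (kb.getD t false))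
      else w.drop 1) ++ [b])
    (bits.take k)
  if window.getD 0 false then
    (List.range' 1 (k - 1)).map (fun t => xor (window.getD t false) (kb.getD t false))
  else window.drop 1

-- _apply(data, idxs) of Source B: flip the chars at the given positions
def applyFlips (chars : List Char) (idxs : List Nat) : List Char :=
  idxs.foldl (fun cs i => cs.set i (if cs.getD i ' ' == '0' then '1' else '0')) chars

def brute_force_correct_alt (data : String) (key : String) : Option String × List Int :=
  let d := data.toList
  let n := d.length
  let k := key.toList.length
  if n = 0 then (none, [])
  else if n < k then (none, [])
  else
    let kb := key.toList.map (fun c => c == '1')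
    let bits := d.map (fun c => c == '1')
    let S := remB bits kb
    let syn := (List.range n).map
      (fun i => remB ((List.range n).map (fun t => decide (t = i))) kb)
    match (List.range n).find? (fun i => S == syn.getD i []) with
    | some i => (some (String.mk (applyFlips d [i])), [(i : Int)])
    | none =>
      match (List.range n).findSome? (fun i =>
          ((List.range' (i + 1) (n - (i + 1))).find?
            (fun j => syn.getD j [] == S.zipWith xor (syn.getD i []))).map
            (fun j => (i, j))) with
      | some (i, j) => (some (String.mk (applyFlips d [i, j])), [(i : Int), (j : Int)])
      | none => (none, [])

-- ===== PRECONDITION & SPEC =====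
-- Pre_ excludes (a) nonempty data with an empty key, where A raises IndexError, and
-- (b) data at least as long as the key containing characters other than '0'/'1' (or a
-- non-binary key): a CRC codeword is a bitstring, and on non-binary chars A's
-- char-equality "xor" yields accidental values B does not reproduce.  Data shorter
-- than the key is admitted with any characters (no check can pass there).
def Pre_brute_force_correct (data : String) (key : String) : Prop :=
  (data = "" ∨ key ≠ "") ∧
    (data.toList.length < key.toList.length ∨
      (data.toList.all (fun c => c == '0' || c == '1') = true ∧
        key.toList.all (fun c => c == '0' || c == '1') = true))
instance (data : String) (key : String) : Decidable (Pre_brute_force_correct data key) := by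
  unfold Pre_brute_force_correct; infer_instance

def pvWitness_brute_force_correct : String × String := ("100100", "1101")

def Spec_brute_force_correct (data : String) (key : String) (out : Option String × List Int) : Prop := out = brute_force_correct_alt data key
instance (data : String) (key : String) (out : Option String × List Int) : Decidable (Spec_brute_force_correct data key out) := by unfold Spec_brute_force_correct; infer_instance

-- ===== CLAIM (what is proved, stated in full; the proofs are below) =====
def Claim_equal_brute_force_correct : Prop := ∀ (data : String) (key : String), Dom_brute_force_correct data key → Pre_brute_force_correct data key → Spec_brute_force_correct data key (brute_force_correct data key)

-- ===== LEMMAS AND PROOFS =====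

-- proof-side abbreviations
def bitOf (c : Char) : Bool := c == '1'
def ofBit (b : Bool) : Char := if b then '1' else '0'
def IsBin (l : List Char) : Prop := ∀ c ∈ l, c = '0' ∨ c = '1'
def zipXor (a b : List Bool) : List Bool := List.zipWith xor a b
def eVec (n i : Nat) : List Bool := (List.range n).map (fun t => decide (t = i))

-- A's loop body / final reduction on the char level
def stepB (key : List Char) (w : List Char) (c : Char) : List Char :=
  (if w.getD 0 ' ' == '1' then
    (List.range' 1 (key.length - 1)).map
      (fun t => if key.getD t ' ' == w.getD t ' ' then '0' else '1')
  else
    (List.range' 1 (key.length - 1)).map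
      (fun t => if w.getD t ' ' == '0' then '0' else '1')) ++ [c]

def finalRed (divisor W : List Char) : List Char :=
  if W.getD 0 ' ' == '1' then
    (List.range' 1 (W.length - 1)).map
      (fun t => if divisor.getD t ' ' == W.getD t ' ' then '0' else '1')
  else
    (List.range' 1 (W.length - 1)).map
      (fun t => if W.getD t ' ' == '0' then '0' else '1')

-- B's loop body / final reduction on the bit level, in uniform (branch-free) form
def stepU (kb : List Bool) (w : List Bool) (b : Bool) : List Bool :=
  (List.range' 1 (kb.length - 1)).map
    (fun t => xor (w.getD t false) ((w.getD 0 false) && kb.getD t false)) ++ [b]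

def finalU (kb w : List Bool) : List Bool :=
  (List.range' 1 (kb.length - 1)).map
    (fun t => xor (w.getD t false) ((w.getD 0 false) && kb.getD t false))

theorem map_pyRange_natCast {β : Type} (F : Int → β) (a n : Nat) :
    (PySem.List.pyRange (a : Int) ((a + n : Nat) : Int)).map F
      = (List.range' a n).map (fun t : Nat => F (t : Int)) := by
  induction n generalizing a with
  | zero => simp [PySem.List.pyRange]
  | succ m ih =>
    rw [PySem.List.pyRange_one_cons (by push_cast; omega)]
    have h1 : ((a : Int) + 1) = ((a + 1 : Nat) : Int) := by push_cast; ring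
    have h2 : ((a + (m + 1) : Nat) : Int) = (((a + 1) + m : Nat) : Int) := by push_cast; ring
    rw [List.map_cons, h1, h2, ih (a + 1), List.range'_succ]
    simp

theorem xorA_eq_map (a b : List Char) (hb : 1 ≤ b.length) :
    xorA a b = (List.range' 1 (b.length - 1)).map
      (fun t => if a.getD t ' ' == b.getD t ' ' then '0' else '1') := by
  unfold xorA
  rw [PySem.List.foldl_append_singleton_eq_map
    (f := fun i => if PySem.List.pyGetD a i ' ' == PySem.List.pyGetD b i ' ' then '0' else '1')]
  rw [PySem.List.len_eq, List.nil_append]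
  have h1 : (b.length : Int) = ((1 + (b.length - 1) : Nat) : Int) := by push_cast; omega
  have h2 : ((1:Nat) : Int) = (1 : Int) := by norm_num
  rw [h1]
  nth_rewrite 1 [← h2]
  rw [map_pyRange_natCast]
  apply List.map_congr_left
  intro t ht
  simp [PySem.List.pyGetD_natCast]

theorem xorA_zeros (p : Nat) (b : List Char) (hb : 1 ≤ b.length) (hp : b.length ≤ p) :
    xorA (List.replicate p '0') b = (List.range' 1 (b.length - 1)).map
      (fun t => if b.getD t ' ' == '0' then '0' else '1') := by
  rw [xorA_eq_map _ _ hb]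
  apply List.map_congr_left
  intro t ht
  have htm : 1 ≤ t ∧ t < 1 + (b.length - 1) := by simp [List.mem_range'] at ht; omega
  have htp : t < p := by omega
  rw [List.getD_replicate _ htp, Bool.beq_comm]

theorem stepB_length (key : List Char) (hk : 1 ≤ key.length) (w : List Char) (c : Char) :
    (stepB key w c).length = key.length := by
  unfold stepB
  split <;> simp [List.length_range'] <;> omega

theorem go_eq (dividend divisor : List Char) (hk : 1 ≤ divisor.length) :
    ∀ pick tmp, divisor.length ≤ pick → tmp.length = divisor.length →
      mod2divGo dividend divisor pick tmp
        = finalRed divisor ((dividend.drop pick).foldl (stepB divisor) tmp) := by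
  intro pick tmp hpk htmp
  induction hf : dividend.length - pick generalizing pick tmp with
  | zero =>
    have hge : dividend.length ≤ pick := by omega
    rw [mod2divGo]
    rw [dif_neg (by omega)]
    rw [List.drop_eq_nil_of_le hge, List.foldl_nil]
    unfold finalRed
    rw [PySem.List.pyGetD_zero]
    have hb1 : 1 ≤ tmp.length := by omega
    split
    · rw [xorA_eq_map _ _ hb1, htmp]
    · rw [xorA_zeros _ _ hb1 (by omega), htmp]
  | succ f ih =>
    have h : pick < dividend.length := by omega
    rw [mod2divGo, dif_pos h]
    have hc : PySem.List.pyGetD dividend (pick : Int) ' ' = dividend[pick] := by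
      rw [PySem.List.pyGetD_natCast, List.getD_eq_getElem?_getD, List.getElem?_eq_getElem h]
      rfl
    have hstep :
        (if PySem.List.pyGetD tmp 0 ' ' == '1' then
            xorA divisor tmp ++ [PySem.List.pyGetD dividend (pick : Int) ' ']
          else
            xorA (List.replicate pick '0') tmp ++ [PySem.List.pyGetD dividend (pick : Int) ' '])
          = stepB divisor tmp dividend[pick] := by
      unfold stepB
      rw [PySem.List.pyGetD_zero, hc]
      have hb1 : 1 ≤ tmp.length := by omega
      split
      · rw [xorA_eq_map _ _ hb1, htmp]
      · rw [xorA_zeros _ _ hb1 (by omega), htmp]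
    rw [hstep]
    rw [List.drop_eq_getElem_cons h, List.foldl_cons]
    exact ih (pick + 1) _ (by omega) (stepB_length divisor hk tmp _) (by omega)

theorem applyFlips_one (d : List Char) (i : Nat) :
    applyFlips d [i] = d.set i (if d.getD i ' ' == '0' then '1' else '0') := by
  simp [applyFlips]

theorem flipAt1_eq (d : List Char) (i : Nat) (h : i < d.length) :
    flipAt1 d i = applyFlips d [i] := by
  rw [applyFlips_one]
  unfold flipAt1
  rw [PySem.List.slice_to d (by positivity), PySem.List.slice_from d (by positivity)]
  rw [show ((i : Int) + 1) = ((i + 1 : Nat) : Int) by push_cast; ring]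
  rw [PySem.List.pyGetD_natCast]
  simp only [Int.toNat_natCast]
  rw [List.set_eq_take_append_cons_drop, if_pos h]
  simp

theorem applyFlips_two (d : List Char) (i j : Nat) (hij : i ≠ j) :
    applyFlips d [i, j] =
      (d.set i (if d.getD i ' ' == '0' then '1' else '0')).set j
        (if d.getD j ' ' == '0' then '1' else '0') := by
  simp only [applyFlips, List.foldl_cons, List.foldl_nil]
  congr 1
  rw [List.getD_eq_getElem?_getD, List.getElem?_set_ne hij, ← List.getD_eq_getElem?_getD]

theorem flipAt2_eq (d : List Char) (i j : Nat) (hij : i < j) (hj : j < d.length) :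
    flipAt2 d i j = applyFlips d [i, j] := by
  rw [applyFlips_two d i j (by omega)]
  unfold flipAt2
  rw [PySem.List.slice_to d (by positivity), PySem.List.slice_from d (by positivity)]
  rw [show ((i : Int) + 1) = ((i + 1 : Nat) : Int) by push_cast; ring,
      show ((j : Int) + 1) = ((j + 1 : Nat) : Int) by push_cast; ring]
  rw [PySem.List.slice_natCast, PySem.List.pyGetD_natCast, PySem.List.pyGetD_natCast]
  simp only [Int.toNat_natCast]
  have hjs : j < (d.set i (if d.getD i ' ' == '0' then '1' else '0')).length := by
    simpa using hj
  rw [List.set_eq_take_append_cons_drop (i := j), if_pos hjs]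
  rw [List.take_set, List.drop_set, if_pos (show i < j + 1 by omega)]
  rw [List.set_eq_take_append_cons_drop (i := i),
      if_pos (show i < (List.take j d).length by simp [List.length_take]; omega)]
  rw [List.take_take, Nat.min_def, if_pos (show i ≤ j by omega), List.drop_take]
  simp [List.append_assoc]

theorem applyFlips_length (d : List Char) (idxs : List Nat) :
    (applyFlips d idxs).length = d.length := by
  unfold applyFlips
  induction idxs generalizing d with
  | nil => rfl
  | cons x xs ih => rw [List.foldl_cons, ih]; simp
-- generic option/list helpers
theorem find?_congr_mem {α : Type} (l : List α) (p q : α → Bool)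
    (h : ∀ a ∈ l, p a = q a) : l.find? p = l.find? q := by
  induction l with
  | nil => rfl
  | cons x xs ih =>
    simp only [List.find?_cons]
    rw [h x (by simp)]
    cases q x
    · exact ih (fun a ha => h a (by simp [ha]))
    · rfl

theorem findSome?_congr_mem {α β : Type} (l : List α) (f g : α → Option β)
    (h : ∀ a ∈ l, f a = g a) : l.findSome? f = l.findSome? g := by
  induction l with
  | nil => rfl
  | cons x xs ih =>
    rw [List.findSome?_cons, List.findSome?_cons, h x (by simp)]
    cases g x
    · exact ih (fun a ha => h a (by simp [ha]))
    · rfl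

theorem beq_false_of_length_ne {α : Type} [BEq α] [LawfulBEq α] (a b : List α)
    (h : a.length ≠ b.length) : (a == b) = false := by
  rw [beq_eq_false_iff_ne]
  intro he; exact h (by rw [he])
theorem stepU_length (kb w : List Bool) (b : Bool) (hk : 1 ≤ kb.length) :
    (stepU kb w b).length = kb.length := by
  simp [stepU, List.length_range']; omega

theorem finalU_length (kb w : List Bool) :
    (finalU kb w).length = kb.length - 1 := by
  simp [finalU, List.length_range']

theorem drop_one_eq_map_range (w : List Bool) (k : Nat) (h : w.length = k) :
    w.drop 1 = (List.range' 1 (k - 1)).map (fun t => w.getD t false) := by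
  apply List.ext_getElem
  · simp [List.length_range']; omega
  · intro m h1 h2
    have hm : m < k - 1 := by simpa [List.length_range'] using h2
    simp only [List.getElem_drop, List.getElem_map, List.getElem_range']
    rw [List.getD_eq_getElem?_getD, List.getElem?_eq_getElem (by omega), Option.getD_some]
    simp

theorem remB_body_eq (kb : List Bool) (w : List Bool) (b : Bool) (hw : w.length = kb.length) :
    ((if w.getD 0 false then
        (List.range' 1 (kb.length - 1)).map (fun t => xor (w.getD t false) (kb.getD t false))
      else w.drop 1) ++ [b]) = stepU kb w b := by
  unfold stepU
  congr 1
  cases h0 : w.getD 0 false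
  · rw [if_neg (by simp [h0]), drop_one_eq_map_range w kb.length hw]
    apply List.map_congr_left
    intro t _
    simp [h0]
  · rw [if_pos (by simp [h0])]
    apply List.map_congr_left
    intro t _
    simp [h0]

theorem foldl_body_stepU (kb : List Bool) (hk : 1 ≤ kb.length) (l : List Bool) :
    ∀ w, w.length = kb.length →
      (l.foldl (fun w b =>
        (if w.getD 0 false then
          (List.range' 1 (kb.length - 1)).map (fun t => xor (w.getD t false) (kb.getD t false))
        else w.drop 1) ++ [b]) w) = l.foldl (stepU kb) w := by
  induction l with
  | nil => intro w _; rfl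
  | cons c cs ih =>
    intro w hw
    rw [List.foldl_cons, List.foldl_cons, remB_body_eq kb w c hw]
    exact ih _ (stepU_length kb w c hk)

theorem foldl_stepU_length (kb : List Bool) (hk : 1 ≤ kb.length) (l : List Bool) :
    ∀ w, w.length = kb.length → (l.foldl (stepU kb) w).length = kb.length := by
  induction l with
  | nil => intro w hw; simpa using hw
  | cons c cs ih => intro w hw; rw [List.foldl_cons]; exact ih _ (stepU_length kb w c hk)

theorem remB_eq (bits kb : List Bool) (hk : 1 ≤ kb.length) (hn : kb.length ≤ bits.length) :
    remB bits kb = finalU kb ((bits.drop kb.length).foldl (stepU kb) (bits.take kb.length)) := by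
  unfold remB
  dsimp only
  have htake : (bits.take kb.length).length = kb.length := by
    simp [List.length_take]; omega
  rw [foldl_body_stepU kb hk _ _ htake]
  have hW : ((bits.drop kb.length).foldl (stepU kb) (bits.take kb.length)).length = kb.length :=
    foldl_stepU_length kb hk _ _ htake
  set W := (bits.drop kb.length).foldl (stepU kb) (bits.take kb.length) with hWdef
  unfold finalU
  cases h0 : W.getD 0 false
  · rw [if_neg (by simp [h0]), drop_one_eq_map_range W kb.length hW]
    apply List.map_congr_left
    intro t _
    simp [h0]
  · rw [if_pos (by simp [h0])]
    apply List.map_congr_left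
    intro t _
    simp [h0]

theorem remB_length (bits kb : List Bool) (hk : 1 ≤ kb.length) (hn : kb.length ≤ bits.length) :
    (remB bits kb).length = kb.length - 1 := by
  rw [remB_eq bits kb hk hn, finalU_length]
theorem getD_lt_eq_getElem {α : Type} (l : List α) (t : Nat) (d : α) (h : t < l.length) :
    l.getD t d = l[t] := by
  rw [List.getD_eq_getElem?_getD, List.getElem?_eq_getElem h, Option.getD_some]

theorem getD_map_lt {α β : Type} (l : List α) (f : α → β) (t : Nat) (d : β) (e : α)
    (h : t < l.length) : (l.map f).getD t d = f (l.getD t e) := by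
  rw [getD_lt_eq_getElem _ _ _ (by simpa using h), getD_lt_eq_getElem _ _ _ h,
    List.getElem_map]

theorem ofBit_bitOf (c : Char) (hc : c = '0' ∨ c = '1') : ofBit (bitOf c) = c := by
  rcases hc with h | h <;> subst h <;> rfl

theorem ofBit_beq_one (b : Bool) : (ofBit b == '1') = b := by cases b <;> rfl

theorem ofBit_beq_zero (b : Bool) : (ofBit b == '0') = !b := by cases b <;> rfl


theorem stepB_toChars (kd : List Char) (hkd : IsBin kd) (hk : 1 ≤ kd.length)
    (w : List Bool) (hw : w.length = kd.length) (c : Char) (hc : c = '0' ∨ c = '1') :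
    stepB kd (w.map ofBit) c = (stepU (kd.map bitOf) w (bitOf c)).map ofBit := by
  unfold stepB stepU
  rw [List.map_append]
  congr 1
  · rw [getD_map_lt w ofBit 0 ' ' false (by omega), ofBit_beq_one]
    simp only [List.length_map]
    rw [List.map_map]
    cases h0 : w.getD 0 false
    · rw [if_neg (by simp [h0])]
      apply List.map_congr_left
      intro t ht
      have htb : 1 ≤ t ∧ t < kd.length := by
        simp only [List.mem_range'] at ht; omega
      simp only [Function.comp_apply, h0, Bool.false_and, Bool.xor_false]
      rw [getD_map_lt w ofBit t ' ' false (by omega), ofBit_beq_zero]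
      cases w.getD t false <;> rfl
    · rw [if_pos rfl]
      apply List.map_congr_left
      intro t ht
      have htb : 1 ≤ t ∧ t < kd.length := by
        simp only [List.mem_range'] at ht; omega
      simp only [Function.comp_apply, h0, Bool.true_and]
      rw [getD_map_lt w ofBit t ' ' false (by omega),
          getD_map_lt kd bitOf t false ' ' (by omega)]
      rcases hkd (kd.getD t ' ') (by
        rw [getD_lt_eq_getElem _ _ _ (by omega)]; exact List.getElem_mem _) with h | h <;>
        rw [h] <;> cases w.getD t false <;> rfl
  · rw [List.map_singleton, ofBit_bitOf c hc]

theorem finalRed_toChars (kd : List Char) (hkd : IsBin kd) (hk : 1 ≤ kd.length)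
    (w : List Bool) (hw : w.length = kd.length) :
    finalRed kd (w.map ofBit) = (finalU (kd.map bitOf) w).map ofBit := by
  unfold finalRed finalU
  rw [getD_map_lt w ofBit 0 ' ' false (by omega), ofBit_beq_one]
  simp only [List.length_map, hw]
  rw [List.map_map]
  cases h0 : w.getD 0 false
  · rw [if_neg (by simp [h0])]
    apply List.map_congr_left
    intro t ht
    have htb : 1 ≤ t ∧ t < kd.length := by
      simp only [List.mem_range'] at ht; omega
    simp only [Function.comp_apply, h0, Bool.false_and, Bool.xor_false]
    rw [getD_map_lt w ofBit t ' ' false (by omega), ofBit_beq_zero]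
    cases w.getD t false <;> rfl
  · rw [if_pos rfl]
    apply List.map_congr_left
    intro t ht
    have htb : 1 ≤ t ∧ t < kd.length := by
      simp only [List.mem_range'] at ht; omega
    simp only [Function.comp_apply, h0, Bool.true_and]
    rw [getD_map_lt w ofBit t ' ' false (by omega),
        getD_map_lt kd bitOf t false ' ' (by omega)]
    rcases hkd (kd.getD t ' ') (by
      rw [getD_lt_eq_getElem _ _ _ (by omega)]; exact List.getElem_mem _) with h | h <;>
      rw [h] <;> cases w.getD t false <;> rfl
theorem foldl_stepB_toChars (kd : List Char) (hkd : IsBin kd) (hk : 1 ≤ kd.length)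
    (l : List Char) (hl : IsBin l) :
    ∀ w : List Bool, w.length = kd.length →
      l.foldl (stepB kd) (w.map ofBit) = ((l.map bitOf).foldl (stepU (kd.map bitOf)) w).map ofBit := by
  induction l with
  | nil => intro w _; rfl
  | cons c cs ih =>
    intro w hw
    rw [List.map_cons, List.foldl_cons, List.foldl_cons,
        stepB_toChars kd hkd hk w hw c (hl c (by simp))]
    exact ih (fun x hx => hl x (by simp [hx])) _
      (by rw [stepU_length _ _ _ (by simpa using hk)]; simpa using hw)

theorem mod2divA_eq (x kd : List Char) (hx : IsBin x) (hkd : IsBin kd)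
    (hk : 1 ≤ kd.length) (hn : kd.length ≤ x.length) :
    mod2divA x kd = (remB (x.map bitOf) (kd.map bitOf)).map ofBit := by
  unfold mod2divA
  rw [show (some (0:Int)) = (some ((0:Nat):Int)) by norm_num, PySem.List.len_eq,
    PySem.List.slice_natCast, List.drop_zero, Nat.sub_zero]
  have htake : (x.take kd.length).length = kd.length := by simp [List.length_take]; omega
  rw [go_eq x kd hk kd.length (x.take kd.length) le_rfl htake]
  have hxt : x.take kd.length = ((x.map bitOf).take kd.length).map ofBit := by
    rw [← List.map_take, List.map_map]
    have : ∀ c ∈ x.take kd.length, (ofBit ∘ bitOf) c = id c := by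
      intro c hcm
      exact ofBit_bitOf c (hx c (List.mem_of_mem_take hcm))
    rw [List.map_congr_left this, List.map_id]
  have hlt : ((x.map bitOf).take kd.length).length = kd.length := by
    simp [List.length_take]; omega
  rw [hxt, foldl_stepB_toChars kd hkd hk (x.drop kd.length)
        (fun c hcm => hx c (List.mem_of_mem_drop hcm)) _ hlt]
  rw [List.map_drop]
  rw [finalRed_toChars kd hkd hk _
        (by rw [foldl_stepU_length (kd.map bitOf) (by simpa using hk) _ _
            (by simp; omega)]; simp)]
  rw [remB_eq _ _ (by simpa using hk) (by simpa using hn)]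
  simp

theorem map_ofBit_beq_replicate (l : List Bool) (m : Nat) :
    (l.map ofBit == List.replicate m '0') = (l == List.replicate m false) := by
  induction l generalizing m with
  | nil => cases m <;> rfl
  | cons b bs ih =>
    cases m with
    | zero => rfl
    | succ m' =>
      simp only [List.map_cons, List.replicate_succ, List.cons_beq_cons, ih, ofBit_beq_zero]
      cases b <;> rfl

theorem checkDataA_eq (x kd : List Char) (hx : IsBin x) (hkd : IsBin kd)
    (hk : 1 ≤ kd.length) (hn : kd.length ≤ x.length) :
    checkDataA x kd
      = (remB (x.map bitOf) (kd.map bitOf) == List.replicate (kd.length - 1) false) := by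
  unfold checkDataA
  rw [mod2divA_eq x kd hx hkd hk hn, map_ofBit_beq_replicate]
-- linearity of the CRC remainder over GF(2)
theorem zipXor_length (a b : List Bool) (h : a.length = b.length) :
    (zipXor a b).length = a.length := by
  simp [zipXor, h]

theorem zipXor_getD (a b : List Bool) (t : Nat) (ha : t < a.length) (hb : t < b.length) :
    (zipXor a b).getD t false = xor (a.getD t false) (b.getD t false) := by
  rw [getD_lt_eq_getElem _ _ _ (by simp [zipXor]; omega),
      getD_lt_eq_getElem _ _ _ ha, getD_lt_eq_getElem _ _ _ hb]
  simp [zipXor]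

theorem zipXor_take (a b : List Bool) (m : Nat) :
    (zipXor a b).take m = zipXor (a.take m) (b.take m) := by
  simp [zipXor, List.take_zipWith]

theorem zipXor_drop (a b : List Bool) (m : Nat) :
    (zipXor a b).drop m = zipXor (a.drop m) (b.drop m) := by
  simp [zipXor, List.drop_zipWith]

theorem zipXor_map_map {α : Type} (l : List α) (f g : α → Bool) :
    zipXor (l.map f) (l.map g) = l.map (fun x => xor (f x) (g x)) := by
  induction l with
  | nil => rfl
  | cons x xs ih =>
    show (xor (f x) (g x)) :: zipXor (xs.map f) (xs.map g) = _
    rw [ih]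
    rfl

theorem stepU_linear (kb : List Bool) (hk : 1 ≤ kb.length) (w1 w2 : List Bool)
    (h1 : w1.length = kb.length) (h2 : w2.length = kb.length) (b1 b2 : Bool) :
    stepU kb (zipXor w1 w2) (xor b1 b2) = zipXor (stepU kb w1 b1) (stepU kb w2 b2) := by
  unfold stepU
  rw [show (zipXor (((List.range' 1 (kb.length - 1)).map
      (fun t => xor (w1.getD t false) ((w1.getD 0 false) && kb.getD t false))) ++ [b1])
      (((List.range' 1 (kb.length - 1)).map
      (fun t => xor (w2.getD t false) ((w2.getD 0 false) && kb.getD t false))) ++ [b2]))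
      = zipXor ((List.range' 1 (kb.length - 1)).map
          (fun t => xor (w1.getD t false) ((w1.getD 0 false) && kb.getD t false)))
          ((List.range' 1 (kb.length - 1)).map
          (fun t => xor (w2.getD t false) ((w2.getD 0 false) && kb.getD t false)))
        ++ zipXor [b1] [b2] from by
    unfold zipXor; rw [List.zipWith_append] <;> simp]
  rw [zipXor_map_map]
  congr 1
  apply List.map_congr_left
  intro t ht
  have htb : 1 ≤ t ∧ t < kb.length := by simp only [List.mem_range'] at ht; omega
  rw [zipXor_getD w1 w2 t (by omega) (by omega), zipXor_getD w1 w2 0 (by omega) (by omega)]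
  cases w1.getD t false <;> cases w2.getD t false <;>
    cases w1.getD 0 false <;> cases w2.getD 0 false <;> cases kb.getD t false <;> rfl

theorem finalU_linear (kb : List Bool) (w1 w2 : List Bool)
    (h1 : w1.length = kb.length) (h2 : w2.length = kb.length) (hk : 1 ≤ kb.length) :
    finalU kb (zipXor w1 w2) = zipXor (finalU kb w1) (finalU kb w2) := by
  unfold finalU
  rw [zipXor_map_map]
  apply List.map_congr_left
  intro t ht
  have htb : 1 ≤ t ∧ t < kb.length := by simp only [List.mem_range'] at ht; omega
  rw [zipXor_getD w1 w2 t (by omega) (by omega), zipXor_getD w1 w2 0 (by omega) (by omega)]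
  cases w1.getD t false <;> cases w2.getD t false <;>
    cases w1.getD 0 false <;> cases w2.getD 0 false <;> cases kb.getD t false <;> rfl

theorem foldl_stepU_linear (kb : List Bool) (hk : 1 ≤ kb.length) (lx : List Bool) :
    ∀ (ly : List Bool) (w1 w2 : List Bool), lx.length = ly.length →
      w1.length = kb.length → w2.length = kb.length →
      (zipXor lx ly).foldl (stepU kb) (zipXor w1 w2)
        = zipXor (lx.foldl (stepU kb) w1) (ly.foldl (stepU kb) w2) := by
  induction lx with
  | nil => intro ly w1 w2 hl _ _; rw [(List.length_eq_zero_iff).mp hl.symm]; rfl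
  | cons b1 bs1 ih =>
    intro ly w1 w2 hl h1 h2
    cases ly with
    | nil => simp at hl
    | cons b2 bs2 =>
      show (zipXor (b1 :: bs1) (b2 :: bs2)).foldl _ _ = _
      rw [show zipXor (b1 :: bs1) (b2 :: bs2) = xor b1 b2 :: zipXor bs1 bs2 from rfl]
      rw [List.foldl_cons, List.foldl_cons, List.foldl_cons,
          stepU_linear kb hk w1 w2 h1 h2 b1 b2]
      exact ih bs2 _ _ (by simpa using hl) (stepU_length kb w1 b1 hk) (stepU_length kb w2 b2 hk)

theorem remB_linear (x y kb : List Bool) (hk : 1 ≤ kb.length) (hxy : x.length = y.length)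
    (hn : kb.length ≤ x.length) :
    remB (zipXor x y) kb = zipXor (remB x kb) (remB y kb) := by
  have hz : (zipXor x y).length = x.length := zipXor_length x y hxy
  rw [remB_eq _ _ hk (by omega), remB_eq _ _ hk hn, remB_eq _ _ hk (by omega)]
  rw [zipXor_take, zipXor_drop]
  have ht1 : (x.take kb.length).length = kb.length := by simp [List.length_take]; omega
  have ht2 : (y.take kb.length).length = kb.length := by simp [List.length_take]; omega
  rw [foldl_stepU_linear kb hk _ _ _ _ (by simp [List.length_drop]; omega) ht1 ht2]
  exact finalU_linear kb _ _ (foldl_stepU_length kb hk _ _ ht1)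
    (foldl_stepU_length kb hk _ _ ht2) hk

theorem zipXor_eq_replicate_iff (a b : List Bool) (h : a.length = b.length) :
    (zipXor a b = List.replicate a.length false) ↔ a = b := by
  constructor
  · intro he
    apply List.ext_getElem h
    intro t h1 h2
    have hx := congrArg (fun l => l.getD t false) he
    simp only at hx
    rw [zipXor_getD a b t h1 h2, List.getD_replicate _ (by simpa using h1)] at hx
    rw [← getD_lt_eq_getElem a t false h1, ← getD_lt_eq_getElem b t false h2]
    cases ha : a.getD t false <;> cases hb : b.getD t false <;>
      rw [ha, hb] at hx <;> simp at hx <;> simp [hx]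
  · intro he
    subst he
    apply List.ext_getElem (by simp [zipXor])
    intro t h1 h2
    simp [zipXor]
theorem eVec_length (n i : Nat) : (eVec n i).length = n := by simp [eVec]

theorem eVec_getElem (n i t : Nat) (h : t < n) :
    (eVec n i)[t]'(by simp [eVec]; omega) = decide (t = i) := by
  simp [eVec]

theorem setXor1 (b : List Bool) (i : Nat) (h : i < b.length) :
    b.set i (!(b.getD i false)) = zipXor b (eVec b.length i) := by
  apply List.ext_getElem (by simp [zipXor, eVec])
  intro t h1 h2
  have ht : t < b.length := by simpa using h1
  rw [List.getElem_set]
  rw [show (zipXor b (eVec b.length i))[t] = xor b[t] ((eVec b.length i)[t]'(by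
    simp [eVec]; omega)) from by simp [zipXor]]
  rw [eVec_getElem _ _ _ ht]
  by_cases he : t = i
  · subst he
    rw [if_pos rfl, getD_lt_eq_getElem _ _ _ ht]
    simp
  · rw [if_neg (fun hh => he hh.symm)]
    simp [he]

theorem setXor2 (b : List Bool) (i j : Nat) (hij : i ≠ j) (hi : i < b.length)
    (hj : j < b.length) :
    (b.set i (!(b.getD i false))).set j (!(b.getD j false))
      = zipXor b (zipXor (eVec b.length i) (eVec b.length j)) := by
  apply List.ext_getElem (by simp [zipXor, eVec])
  intro t h1 h2
  have ht : t < b.length := by simpa using h1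
  rw [List.getElem_set, List.getElem_set]
  rw [show (zipXor b (zipXor (eVec b.length i) (eVec b.length j)))[t]
      = xor b[t] (xor ((eVec b.length i)[t]'(by simp [eVec]; omega))
          ((eVec b.length j)[t]'(by simp [eVec]; omega))) from by simp [zipXor]]
  rw [eVec_getElem _ _ _ ht, eVec_getElem _ _ _ ht]
  by_cases hti : t = i
  · subst hti
    rw [if_neg hij.symm, if_pos rfl, getD_lt_eq_getElem _ _ _ hi]
    simp [hij]
  · by_cases htj : t = j
    · subst htj
      rw [if_pos rfl, getD_lt_eq_getElem _ _ _ hj]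
      simp [hti]
    · rw [if_neg (fun hh => htj hh.symm), if_neg (fun hh => hti hh.symm)]
      simp [hti, htj]

theorem bitOf_flipChar (c : Char) (hc : c = '0' ∨ c = '1') :
    bitOf (if c == '0' then '1' else '0') = !(bitOf c) := by
  rcases hc with h | h <;> subst h <;> rfl

theorem flipChar_bin (c : Char) : (if c == '0' then '1' else '0') = '0'
    ∨ (if c == '0' then '1' else '0') = '1' := by
  split
  · right; rfl
  · left; rfl

theorem IsBin_set (d : List Char) (hd : IsBin d) (i : Nat) (c : Char)
    (hc : c = '0' ∨ c = '1') : IsBin (d.set i c) := by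
  intro x hx
  rcases List.mem_or_eq_of_mem_set hx with h | h
  · exact hd x h
  · subst h; exact hc

theorem IsBin_applyFlips_one (d : List Char) (hd : IsBin d) (i : Nat) :
    IsBin (applyFlips d [i]) := by
  rw [applyFlips_one]
  exact IsBin_set d hd i _ (flipChar_bin _)

theorem IsBin_applyFlips_two (d : List Char) (hd : IsBin d) (i j : Nat) (hij : i ≠ j) :
    IsBin (applyFlips d [i, j]) := by
  rw [applyFlips_two d i j hij]
  exact IsBin_set _ (IsBin_set d hd i _ (flipChar_bin _)) j _ (flipChar_bin _)

theorem toBits_flip1 (d : List Char) (hd : IsBin d) (i : Nat) (h : i < d.length) :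
    (applyFlips d [i]).map bitOf = zipXor (d.map bitOf) (eVec d.length i) := by
  rw [applyFlips_one, List.map_set]
  have hge : d.getD i ' ' ∈ d := by
    rw [getD_lt_eq_getElem _ _ _ h]; exact List.getElem_mem _
  rw [bitOf_flipChar _ (hd _ hge)]
  rw [show bitOf (d.getD i ' ') = (d.map bitOf).getD i false from
    (getD_map_lt d bitOf i false ' ' h).symm]
  rw [show d.length = (d.map bitOf).length from by simp]
  exact setXor1 (d.map bitOf) i (by simpa using h)

theorem toBits_flip2 (d : List Char) (hd : IsBin d) (i j : Nat) (hij : i < j)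
    (hj : j < d.length) :
    (applyFlips d [i, j]).map bitOf
      = zipXor (d.map bitOf) (zipXor (eVec d.length i) (eVec d.length j)) := by
  rw [applyFlips_two d i j (by omega), List.map_set, List.map_set]
  have hgi : d.getD i ' ' ∈ d := by
    rw [getD_lt_eq_getElem _ _ _ (by omega)]; exact List.getElem_mem _
  have hgj : d.getD j ' ' ∈ d := by
    rw [getD_lt_eq_getElem _ _ _ hj]; exact List.getElem_mem _
  rw [bitOf_flipChar _ (hd _ hgi), bitOf_flipChar _ (hd _ hgj)]
  rw [show bitOf (d.getD i ' ') = (d.map bitOf).getD i false from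
    (getD_map_lt d bitOf i false ' ' (by omega)).symm]
  rw [show bitOf (d.getD j ' ') = (d.map bitOf).getD j false from
    (getD_map_lt d bitOf j false ' ' hj).symm]
  rw [show d.length = (d.map bitOf).length from by simp]
  exact setXor2 (d.map bitOf) i j (by omega) (by simpa using (by omega : i < d.length))
    (by simpa using hj)
theorem search1A_eq (d kd : List Char) : ∀ i,
    search1A d kd i
      = ((List.range' i (d.length - i)).find? (fun t => checkDataA (flipAt1 d t) kd)).map
          (fun t => (flipAt1 d t, [(t : Int)])) := by
  intro i
  induction hf : d.length - i generalizing i with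
  | zero =>
    rw [search1A, dif_neg (by omega)]
    simp
  | succ f ih =>
    have h : i < d.length := by omega
    rw [search1A, dif_pos h, List.range'_succ]
    cases hc : checkDataA (flipAt1 d i) kd
    · rw [List.find?_cons_of_neg (by simp [hc])]
      simp only [hc, Bool.false_eq_true, if_false]
      rw [show f = d.length - (i + 1) by omega] at ih ⊢
      exact ih (i + 1) rfl
    · rw [List.find?_cons_of_pos (by simp [hc])]
      simp [hc]

theorem search2InnerA_eq (d kd : List Char) (i : Nat) : ∀ j,
    search2InnerA d kd i j
      = ((List.range' j (d.length - j)).find? (fun t => checkDataA (flipAt2 d i t) kd)).map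
          (fun t => (flipAt2 d i t, [(i : Int), (t : Int)])) := by
  intro j
  induction hf : d.length - j generalizing j with
  | zero =>
    rw [search2InnerA, dif_neg (by omega)]
    simp
  | succ f ih =>
    have h : j < d.length := by omega
    rw [search2InnerA, dif_pos h, List.range'_succ]
    cases hc : checkDataA (flipAt2 d i j) kd
    · rw [List.find?_cons_of_neg (by simp [hc])]
      simp only [hc, Bool.false_eq_true, if_false]
      rw [show f = d.length - (j + 1) by omega] at ih ⊢
      exact ih (j + 1) rfl
    · rw [List.find?_cons_of_pos (by simp [hc])]
      simp [hc]

theorem search2A_eq (d kd : List Char) : ∀ i,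
    search2A d kd i
      = ((List.range' i (d.length - i)).findSome? (fun t =>
          ((List.range' (t + 1) (d.length - (t + 1))).find?
            (fun j => checkDataA (flipAt2 d t j) kd)).map (fun j => (t, j)))).map
          (fun p => (flipAt2 d p.1 p.2, [(p.1 : Int), (p.2 : Int)])) := by
  intro i
  induction hf : d.length - i generalizing i with
  | zero =>
    rw [search2A, dif_neg (by omega)]
    simp
  | succ f ih =>
    have h : i < d.length := by omega
    rw [search2A, dif_pos h, List.range'_succ, List.findSome?_cons]
    rw [search2InnerA_eq d kd i (i + 1)]
    cases hfind : (List.range' (i + 1) (d.length - (i + 1))).find?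
        (fun j => checkDataA (flipAt2 d i j) kd) with
    | some j => simp [hfind]
    | none =>
      simp only [hfind, Option.map_none]
      rw [show f = d.length - (i + 1) by omega] at ih ⊢
      simpa using ih (i + 1) rfl

theorem zipXor_assoc (a : List Bool) : ∀ b c, zipXor (zipXor a b) c = zipXor a (zipXor b c) := by
  induction a with
  | nil => intro b c; rfl
  | cons x xs ih =>
    intro b c
    cases b with
    | nil => rfl
    | cons y ys =>
      cases c with
      | nil => rfl
      | cons z zs =>
        show (xor (xor x y) z) :: zipXor (zipXor xs ys) zs = _
        rw [ih ys zs, Bool.xor_assoc]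
        rfl

theorem list_beq_comm {α : Type} [BEq α] [LawfulBEq α] (a b : List α) :
    (a == b) = (b == a) := by
  rw [Bool.eq_iff_iff]
  constructor
  · intro h; exact beq_iff_eq.mpr (beq_iff_eq.mp h).symm
  · intro h; exact beq_iff_eq.mpr (beq_iff_eq.mp h).symm

theorem zipXor_beq_replicate (a b : List Bool) (h : a.length = b.length) :
    (zipXor a b == List.replicate a.length false) = (a == b) := by
  rw [Bool.eq_iff_iff]
  simp only [beq_iff_eq]
  exact zipXor_eq_replicate_iff a b h

theorem bin_of_all (l : List Char) (h : l.all (fun c => c == '0' || c == '1') = true) :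
    IsBin l := by
  intro c hc
  have := List.all_eq_true.mp h c hc
  simp only [Bool.or_eq_true, beq_iff_eq] at this
  exact this

theorem pred1_eq (d kd : List Char) (hd : IsBin d) (hkd : IsBin kd)
    (hk : 1 ≤ kd.length) (hn : kd.length ≤ d.length) (i : Nat) (hi : i < d.length) :
    checkDataA (flipAt1 d i) kd
      = (remB (d.map bitOf) (kd.map bitOf) == remB (eVec d.length i) (kd.map bitOf)) := by
  have hkb : (kd.map bitOf).length = kd.length := by simp
  have hbl : (d.map bitOf).length = d.length := by simp
  rw [flipAt1_eq d i hi,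
      checkDataA_eq _ kd (IsBin_applyFlips_one d hd i) hkd hk
        (by rw [applyFlips_length]; omega),
      toBits_flip1 d hd i hi,
      remB_linear _ _ _ (by omega) (by rw [hbl, eVec_length]) (by omega)]
  have hS : (remB (d.map bitOf) (kd.map bitOf)).length = kd.length - 1 := by
    rw [remB_length _ _ (by omega) (by omega), hkb]
  have hsi : (remB (eVec d.length i) (kd.map bitOf)).length = kd.length - 1 := by
    rw [remB_length _ _ (by omega) (by rw [eVec_length]; omega), hkb]
  rw [show kd.length - 1 = (remB (d.map bitOf) (kd.map bitOf)).length from hS.symm]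
  exact zipXor_beq_replicate _ _ (by rw [hS, hsi])

theorem pred2_eq (d kd : List Char) (hd : IsBin d) (hkd : IsBin kd)
    (hk : 1 ≤ kd.length) (hn : kd.length ≤ d.length) (i j : Nat) (hij : i < j)
    (hj : j < d.length) :
    checkDataA (flipAt2 d i j) kd
      = (remB (eVec d.length j) (kd.map bitOf)
          == zipXor (remB (d.map bitOf) (kd.map bitOf)) (remB (eVec d.length i) (kd.map bitOf))) := by
  have hkb : (kd.map bitOf).length = kd.length := by simp
  have hbl : (d.map bitOf).length = d.length := by simp
  rw [flipAt2_eq d i j hij hj,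
      checkDataA_eq _ kd (IsBin_applyFlips_two d hd i j (by omega)) hkd hk
        (by rw [applyFlips_length]; omega),
      toBits_flip2 d hd i j hij hj,
      remB_linear _ _ _ (by omega)
        (by rw [hbl, zipXor_length] <;> simp [eVec_length]) (by omega),
      remB_linear _ _ _ (by omega) (by simp [eVec_length]) (by rw [eVec_length]; omega),
      ← zipXor_assoc]
  have hS : (remB (d.map bitOf) (kd.map bitOf)).length = kd.length - 1 := by
    rw [remB_length _ _ (by omega) (by omega), hkb]
  have hsi : (remB (eVec d.length i) (kd.map bitOf)).length = kd.length - 1 := by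
    rw [remB_length _ _ (by omega) (by rw [eVec_length]; omega), hkb]
  have hsj : (remB (eVec d.length j) (kd.map bitOf)).length = kd.length - 1 := by
    rw [remB_length _ _ (by omega) (by rw [eVec_length]; omega), hkb]
  have hz : (zipXor (remB (d.map bitOf) (kd.map bitOf))
      (remB (eVec d.length i) (kd.map bitOf))).length = kd.length - 1 := by
    rw [zipXor_length _ _ (by rw [hS, hsi]), hS]
  rw [show kd.length - 1
      = (zipXor (remB (d.map bitOf) (kd.map bitOf))
          (remB (eVec d.length i) (kd.map bitOf))).length from hz.symm]
  rw [zipXor_beq_replicate _ _ (by rw [hz, hsj])]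
  exact list_beq_comm _ _

theorem checkDataA_short (x kd : List Char) (hx : x ≠ []) (hn : x.length < kd.length) :
    checkDataA x kd = false := by
  have hx1 : 1 ≤ x.length := List.length_pos_of_ne_nil hx
  unfold checkDataA mod2divA
  rw [show (some (0:Int)) = (some ((0:Nat):Int)) by norm_num, PySem.List.len_eq,
    PySem.List.slice_natCast, List.drop_zero, Nat.sub_zero,
    List.take_of_length_le (by omega)]
  rw [mod2divGo, dif_neg (by omega)]
  rw [PySem.List.pyGetD_zero]
  split
  · apply beq_false_of_length_ne
    rw [xorA_eq_map _ _ hx1]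
    simp [List.length_range']
    omega
  · apply beq_false_of_length_ne
    rw [xorA_zeros _ _ hx1 (by omega)]
    simp [List.length_range']
    omega

theorem findSome?_some_mem {α β : Type} (l : List α) (f : α → Option β) (b : β)
    (h : l.findSome? f = some b) : ∃ a ∈ l, f a = some b := by
  induction l with
  | nil => simp at h
  | cons x xs ih =>
    rw [List.findSome?_cons] at h
    cases hfx : f x with
    | some y =>
      rw [hfx] at h
      simp only [] at h
      exact ⟨x, by simp, by rw [hfx]; exact h⟩
    | none =>
      rw [hfx] at h
      obtain ⟨a, ha, hfa⟩ := ih (by simpa using h)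
      exact ⟨a, by simp [ha], hfa⟩

theorem bfc_equiv : ∀ (data key : String),
    Pre_brute_force_correct data key →
    brute_force_correct data key = brute_force_correct_alt data key := by
  intro data key hpre
  obtain ⟨hek, hdisj⟩ := hpre
  by_cases hd0 : data.toList = []
  · have h1 : search1A data.toList key.toList 0 = none := by
      rw [search1A_eq]; simp [hd0]
    have h2 : search2A data.toList key.toList 0 = none := by
      rw [search2A_eq]; simp [hd0]
    unfold brute_force_correct brute_force_correct_alt
    rw [h1, h2]
    simp [hd0]
  · have hk0 : key.toList ≠ [] := by
      rcases hek with h | h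
      · exact absurd (by rw [h]; rfl) hd0
      · intro hn
        exact h (by
          have := congrArg String.ofList hn
          simpa using this)
    have hn1 : 1 ≤ data.toList.length := List.length_pos_of_ne_nil hd0
    have hk1 : 1 ≤ key.toList.length := List.length_pos_of_ne_nil hk0
    by_cases hnk : data.toList.length < key.toList.length
    · -- data shorter than the key: every CRC check fails on both sides
      have hflip1 : ∀ t ∈ List.range' 0 (data.toList.length - 0),
          checkDataA (flipAt1 data.toList t) key.toList = false := by
        intro t ht
        have htn : t < data.toList.length := by
          simp only [List.mem_range'] at ht; omega
        rw [flipAt1_eq _ _ htn]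
        exact checkDataA_short _ _
          (by apply List.ne_nil_of_length_pos; rw [applyFlips_length]; omega)
          (by rw [applyFlips_length]; omega)
      have h1 : search1A data.toList key.toList 0 = none := by
        rw [search1A_eq]
        rw [List.find?_eq_none.mpr (fun x hx => by simp [hflip1 x hx])]
        rfl
      have h2 : search2A data.toList key.toList 0 = none := by
        rw [search2A_eq]
        have hin : ∀ t ∈ List.range' 0 (data.toList.length - 0),
            ((List.range' (t + 1) (data.toList.length - (t + 1))).find?
              (fun j => checkDataA (flipAt2 data.toList t j) key.toList)).map
              (fun j => (t, j)) = (none : Option (Nat × Nat)) := by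
          intro t ht
          have htn : t < data.toList.length := by
            simp only [List.mem_range'] at ht; omega
          have hfn : (List.range' (t + 1) (data.toList.length - (t + 1))).find?
              (fun j => checkDataA (flipAt2 data.toList t j) key.toList) = none := by
            apply List.find?_eq_none.mpr
            intro j hj
            have hjb : t + 1 ≤ j ∧ j < data.toList.length := by
              simp only [List.mem_range'] at hj; omega
            rw [flipAt2_eq _ _ _ (by omega) (by omega)]
            rw [checkDataA_short (applyFlips data.toList [t, j]) key.toList
              (by apply List.ne_nil_of_length_pos; rw [applyFlips_length]; omega)
              (by rw [applyFlips_length]; omega)]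
            simp
          rw [hfn]
          rfl
        rw [findSome?_congr_mem _ _ _ hin]
        simp
      unfold brute_force_correct brute_force_correct_alt
      rw [h1, h2]
      dsimp only
      rw [if_neg (by omega), if_pos hnk]
    · -- the main case: syndrome comparison
      have hnk' : key.toList.length ≤ data.toList.length := by omega
      have hbin := hdisj.resolve_left (by omega)
      have hd : IsBin data.toList := bin_of_all _ hbin.1
      have hkdbin : IsBin key.toList := bin_of_all _ hbin.2
      -- getD of the syndrome table
      have hgetD : ∀ i, i < data.toList.length →
          (List.map
            (fun i => remB (List.map (fun t => decide (t = i)) (List.range data.toList.length))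
              (List.map (fun c => c == '1') key.toList))
            (List.range data.toList.length)).getD i []
          = remB (eVec data.toList.length i) (key.toList.map bitOf) := by
        intro i hi
        rw [getD_map_lt _ _ i [] 0 (by simpa using hi)]
        rw [getD_lt_eq_getElem _ _ _ (by simpa using hi), List.getElem_range]
        rfl
      have hpred1 : ∀ i ∈ List.range data.toList.length,
          checkDataA (flipAt1 data.toList i) key.toList
            = (remB (List.map (fun c => c == '1') data.toList)
                  (List.map (fun c => c == '1') key.toList) ==
                (List.map
                  (fun i => remB (List.map (fun t => decide (t = i)) (List.range data.toList.length))
                    (List.map (fun c => c == '1') key.toList))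
                  (List.range data.toList.length)).getD i []) := by
        intro i hmem
        have hi : i < data.toList.length := List.mem_range.mp hmem
        rw [pred1_eq data.toList key.toList hd hkdbin hk1 hnk' i hi, hgetD i hi]
        rfl
      have hpred2 : ∀ t ∈ List.range data.toList.length,
          ((List.range' (t + 1) (data.toList.length - (t + 1))).find?
            (fun j => checkDataA (flipAt2 data.toList t j) key.toList)).map (fun j => (t, j))
          = ((List.range' (t + 1) (data.toList.length - (t + 1))).find?
              (fun j =>
                (List.map
                  (fun i => remB (List.map (fun t => decide (t = i)) (List.range data.toList.length))
                    (List.map (fun c => c == '1') key.toList))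
                  (List.range data.toList.length)).getD j [] ==
                List.zipWith xor
                  (remB (List.map (fun c => c == '1') data.toList)
                    (List.map (fun c => c == '1') key.toList))
                  ((List.map
                    (fun i => remB (List.map (fun t => decide (t = i)) (List.range data.toList.length))
                      (List.map (fun c => c == '1') key.toList))
                    (List.range data.toList.length)).getD t []))).map (fun j => (t, j)) := by
        intro t hmem
        have ht : t < data.toList.length := List.mem_range.mp hmem
        rw [find?_congr_mem]
        intro j hj
        have hjb : t + 1 ≤ j ∧ j < data.toList.length := by
          simp only [List.mem_range'] at hj; omega
        have h2j : t < j := by omega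
        have h2n : j < data.toList.length := by omega
        rw [pred2_eq data.toList key.toList hd hkdbin hk1 hnk' t j h2j h2n,
            hgetD t ht, hgetD j h2n]
        rfl
      unfold brute_force_correct brute_force_correct_alt
      dsimp only
      rw [if_neg (by omega), if_neg (by omega)]
      rw [search1A_eq, search2A_eq, Nat.sub_zero, ← List.range_eq_range']
      rw [find?_congr_mem _ _ _ hpred1]
      cases hf1 : (List.range data.toList.length).find?
          (fun i =>
            remB (List.map (fun c => c == '1') data.toList)
                (List.map (fun c => c == '1') key.toList) ==
              (List.map
                (fun i => remB (List.map (fun t => decide (t = i)) (List.range data.toList.length))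
                  (List.map (fun c => c == '1') key.toList))
                (List.range data.toList.length)).getD i []) with
      | some i =>
        have hi : i < data.toList.length :=
          List.mem_range.mp (List.mem_of_find?_eq_some hf1)
        simp [flipAt1_eq _ _ hi]
      | none =>
        simp only [Option.map_none]
        rw [findSome?_congr_mem _ _ _ hpred2]
        cases hf2 : (List.range data.toList.length).findSome?
            (fun t =>
              ((List.range' (t + 1) (data.toList.length - (t + 1))).find?
                (fun j =>
                  (List.map
                    (fun i => remB (List.map (fun t => decide (t = i)) (List.range data.toList.length))
                      (List.map (fun c => c == '1') key.toList))
                    (List.range data.toList.length)).getD j [] ==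
                  List.zipWith xor
                    (remB (List.map (fun c => c == '1') data.toList)
                      (List.map (fun c => c == '1') key.toList))
                    ((List.map
                      (fun i => remB (List.map (fun t => decide (t = i)) (List.range data.toList.length))
                        (List.map (fun c => c == '1') key.toList))
                      (List.range data.toList.length)).getD t []))).map (fun j => (t, j))) with
        | some p =>
          obtain ⟨t, htmem, hft⟩ := findSome?_some_mem _ _ _ hf2
          obtain ⟨j, hjfind, hpj⟩ := Option.map_eq_some_iff.mp hft
          have htj : t = p.1 ∧ j = p.2 := by
            constructor <;> simp [← hpj]
          have hjmem : j ∈ List.range' (t + 1) (data.toList.length - (t + 1)) :=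
            List.mem_of_find?_eq_some hjfind
          have hjb : t + 1 ≤ j ∧ j < data.toList.length := by
            simp only [List.mem_range'] at hjmem; omega
          obtain ⟨p1, p2⟩ := p
          simp only [Option.map_some]
          obtain ⟨ht1, ht2⟩ := htj
          subst ht1; subst ht2
          have haj : t < j := by omega
          have hbj : j < data.toList.length := by omega
          rw [flipAt2_eq data.toList t j haj hbj]
        | none =>
          rfl

-- ===== VERDICT (by name: the statement is the Claim_ definition above) =====
theorem brute_force_correct_spec : Claim_equal_brute_force_correct := by
  unfold Claim_equal_brute_force_correct
  intro data key _ hpre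
  unfold Spec_brute_force_correct
  exact bfc_equiv data key hpre
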